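-- pv_equiv track=rewrite | github.com/jaehyun-dev/Today-I-Learned | Algorithm/Quiz.py | sublist_max
-- ===== SOURCE A (Python) =====
-- def sublist_max(profits):
--     # 코드를 작성하세요.
--     left_max = 0
--     right_max = 0
--
--     i = 0
--     while i < len(profits):
--         if profits[i] > 0:
--             left_max = i
--             break
--         i += 1
--
--
--     i = len(profits) - 1
--     while i > 0:
--         if profits[i] > 0:
--             right_max = i
--             break
--         i -= 1
--
--     profit_sum = 0
--     for i in range(left_max, right_max + 1):
--         profit_sum += profits[i]
--
--     return profit_sum
-- ===== SOURCE B (Python) =====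
-- def sublist_max(profits):
--     # Single left-to-right pass with a state machine: once a positive entry is
--     # seen, keep a committed total (sum up to the last positive so far) and a
--     # pending gap (sum of the non-positive run after it); each new positive
--     # commits the gap.  No index arithmetic, no second scan.
--     total = 0
--     gap = 0
--     seen = False
--     for p in profits:
--         if p > 0:
--             if seen:
--                 total += gap + p
--             else:
--                 total = p
--                 seen = True
--             gap = 0
--         elif seen:
--             gap += p
--     return total
-- ===== Notes on version B (the rewrite author's own statement) =====
-- stated objective: alternative
-- what changed: B replaces A's three staged index scans (forward scan for the first positive, backward scan for the last positive, then an indexed summation loop) with a single left-to-right value pass and no index arithmetic: a state machine keeps a committed total up to the last positive seen and a pending gap sum that each new positive commits.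
-- intended difference: On nonempty lists with no positive entry and a nonzero first element, A returns profits[0] (an artefact of its left/right indices both defaulting to 0), while B returns 0, the sum of the empty selection between nonexistent positives, which is the intended value. — e.g. on sublist_max([-1]): A returns -1, B returns 0
import Mathlib
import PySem

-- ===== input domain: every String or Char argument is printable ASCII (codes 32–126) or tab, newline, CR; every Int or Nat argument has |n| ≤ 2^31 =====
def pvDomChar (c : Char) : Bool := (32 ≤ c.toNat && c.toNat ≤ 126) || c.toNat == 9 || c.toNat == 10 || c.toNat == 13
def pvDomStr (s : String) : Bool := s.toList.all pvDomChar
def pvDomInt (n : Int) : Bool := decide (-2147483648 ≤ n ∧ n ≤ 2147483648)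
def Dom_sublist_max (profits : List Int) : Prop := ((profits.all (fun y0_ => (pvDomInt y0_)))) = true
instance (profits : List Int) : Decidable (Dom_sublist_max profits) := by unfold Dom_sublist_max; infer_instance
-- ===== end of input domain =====

-- B replaces A's three staged index scans by ONE left-to-right value pass (state machine:
-- committed total + pending gap); on all-nonpositive input B returns 0 where A returns profits[0].

-- ===== PORT A =====
-- forward while-loop: i = 0; while i < len: if profits[i] > 0: left_max = i; break; i += 1
def sublistMaxLeft (profits : List Int) (i : Nat) : Nat :=
  if _h : i < profits.length then
    if PySem.List.pyGetD profits (i : Int) 0 > 0 then i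
    else sublistMaxLeft profits (i + 1)
  else 0
termination_by profits.length - i

-- backward while-loop: i = len-1; while i > 0: if profits[i] > 0: right_max = i; break; i -= 1
def sublistMaxRight (profits : List Int) : Nat → Nat
  | 0 => 0
  | (i + 1) =>
      if PySem.List.pyGetD profits ((i + 1 : Nat) : Int) 0 > 0 then i + 1
      else sublistMaxRight profits i

def sublist_max (profits : List Int) : Int :=
  let left_max := sublistMaxLeft profits 0
  let right_max := sublistMaxRight profits (profits.length - 1)
  (PySem.List.pyRange (left_max : Int) ((right_max : Int) + 1) 1).foldl
    (fun acc j => acc + PySem.List.pyGetD profits j 0) 0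

-- ===== PORT B =====
-- one loop step of Source B: state (total, gap, seen)
def sublistMaxStep (st : Int × Int × Bool) (p : Int) : Int × Int × Bool :=
  if p > 0 then
    if st.2.2 then (st.1 + st.2.1 + p, 0, true) else (p, 0, true)
  else if st.2.2 then (st.1, st.2.1 + p, true)
  else st

def sublist_max_alt (profits : List Int) : Int :=
  (profits.foldl sublistMaxStep (0, 0, false)).1

-- ===== PRECONDITION & SPEC =====
-- Pre_ excludes only the empty list, on which A raises IndexError (profits[0] in the sum loop).
def Pre_sublist_max (profits : List Int) : Prop := profits ≠ []
instance (profits : List Int) : Decidable (Pre_sublist_max profits) := by unfold Pre_sublist_max; infer_instance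
def pvWitness_sublist_max : List Int := [1, -2, 3]

-- On nonempty lists with no positive entry and a nonzero first element, A returns profits[0]
-- (both its default indices are 0, an artefact), while B returns 0, the intended empty-selection sum.
def D_sublist_max (profits : List Int) : Prop :=
  (∀ p ∈ profits, p ≤ 0) ∧ profits.head?.getD 0 ≠ 0
instance (profits : List Int) : Decidable (D_sublist_max profits) := by unfold D_sublist_max; infer_instance

def Spec_sublist_max (profits : List Int) (out : Int) : Prop :=
  ¬ D_sublist_max profits → out = sublist_max_alt profits
instance (profits : List Int) (out : Int) : Decidable (Spec_sublist_max profits out) := by unfold Spec_sublist_max; infer_instance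

def pvDiffWitness_sublist_max : List Int := [-1]
def pvDiffWitnessOut_sublist_max : Int × Int := (-1, 0)

-- ===== CLAIM (what is proved, stated in full; the proofs are below) =====
def Claim_unchanged_sublist_max : Prop := ∀ (profits : List Int), Dom_sublist_max profits → Pre_sublist_max profits → Spec_sublist_max profits (sublist_max profits)
def Claim_changed_sublist_max : Prop := Dom_sublist_max (pvDiffWitness_sublist_max) ∧ Pre_sublist_max (pvDiffWitness_sublist_max) ∧ D_sublist_max (pvDiffWitness_sublist_max) ∧ sublist_max (pvDiffWitness_sublist_max) = pvDiffWitnessOut_sublist_max.1 ∧ sublist_max_alt (pvDiffWitness_sublist_max) = pvDiffWitnessOut_sublist_max.2 ∧ pvDiffWitnessOut_sublist_max.1 ≠ pvDiffWitnessOut_sublist_max.2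
def Claim_exact_sublist_max : Prop := ∀ (profits : List Int), Dom_sublist_max profits → Pre_sublist_max profits → D_sublist_max profits → sublist_max profits ≠ sublist_max_alt profits

-- ===== LEMMAS AND PROOFS =====

-- index of the first / last positive element (spec views of A's two scans and of B's flag)
def firstPos : List Int → Option Nat
  | [] => none
  | x :: xs => if x > 0 then some 0 else (firstPos xs).map (· + 1)

def lastPos : List Int → Option Nat
  | [] => none
  | x :: xs =>
      match lastPos xs with
      | some j => some (j + 1)
      | none => if x > 0 then some 0 else none

lemma firstPos_eq_none_iff (ps : List Int) : firstPos ps = none ↔ ∀ p ∈ ps, p ≤ 0 := by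
  induction ps with
  | nil => simp [firstPos]
  | cons x xs ih =>
      by_cases hx : x > 0
      · have hx' : ¬ (x ≤ 0) := by omega
        simp [firstPos, hx, hx']
      · have hx' : x ≤ 0 := by omega
        simp [firstPos, hx, hx', ih]

lemma lastPos_eq_none_iff (ps : List Int) : lastPos ps = none ↔ ∀ p ∈ ps, p ≤ 0 := by
  induction ps with
  | nil => simp [lastPos]
  | cons x xs ih =>
      simp only [lastPos]
      cases h : lastPos xs with
      | some j =>
          have hne : ¬ ∀ p ∈ xs, p ≤ 0 := by rw [← ih]; simp [h]
          simp [hne]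
      | none =>
          have hxs : ∀ p ∈ xs, p ≤ 0 := ih.mp h
          by_cases hx : x > 0
          · have hx' : ¬ (x ≤ 0) := by omega
            simp [hx, hx']
          · have hx' : x ≤ 0 := by omega
            simp [hx, hx']
            exact hxs

lemma lastPos_lt_length (ps : List Int) (r : Nat) (h : lastPos ps = some r) : r < ps.length := by
  induction ps generalizing r with
  | nil => simp [lastPos] at h
  | cons x xs ih =>
      simp only [lastPos] at h
      cases h' : lastPos xs with
      | some j =>
          rw [h'] at h
          obtain rfl : j + 1 = r := by simpa using h
          have := ih j h'
          simp; omega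
      | none =>
          rw [h'] at h
          by_cases hx : x > 0
          · rw [if_pos hx] at h
            obtain rfl : (0 : Nat) = r := by simpa using h
            simp
          · rw [if_neg hx] at h
            exact absurd h (by simp)

lemma firstPos_le_lastPos (ps : List Int) (f r : Nat)
    (hf : firstPos ps = some f) (hr : lastPos ps = some r) : f ≤ r := by
  induction ps generalizing f r with
  | nil => simp [firstPos] at hf
  | cons x xs ih =>
      by_cases hx : x > 0
      · simp [firstPos, hx] at hf; omega
      · simp only [firstPos, if_neg hx] at hf
        cases hf' : firstPos xs with
        | none => rw [hf'] at hf; exact absurd hf (by simp)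
        | some f' =>
            rw [hf'] at hf
            obtain rfl : f' + 1 = f := by simpa using hf
            simp only [lastPos] at hr
            cases hr' : lastPos xs with
            | some r' =>
                rw [hr'] at hr
                obtain rfl : r' + 1 = r := by simpa using hr
                have := ih f' r' hf' hr'
                omega
            | none =>
                exfalso
                have hxs := (lastPos_eq_none_iff xs).mp hr'
                have : firstPos xs = none := (firstPos_eq_none_iff xs).mpr hxs
                rw [this] at hf'; exact absurd hf'.symm (by simp)

lemma firstPos_append_singleton (l : List Int) (x : Int) :
    firstPos (l ++ [x]) =
      match firstPos l with
      | some f => some f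
      | none => if x > 0 then some l.length else none := by
  induction l with
  | nil => simp [firstPos]
  | cons y ys ih =>
      by_cases hy : y > 0
      · simp only [List.cons_append, firstPos, if_pos hy]
      · simp only [List.cons_append, firstPos, if_neg hy, ih]
        cases h : firstPos ys with
        | some f => rfl
        | none => by_cases hx : x > 0 <;> simp [hx]



lemma lastPos_append_singleton (l : List Int) (x : Int) :
    lastPos (l ++ [x]) = if x > 0 then some l.length else lastPos l := by
  induction l with
  | nil => by_cases hx : x > 0 <;> simp [lastPos, hx]
  | cons y ys ih =>
      simp only [List.cons_append, lastPos, ih, List.length_cons]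
      by_cases hx : x > 0 <;> cases h : lastPos ys <;> simp [hx]

-- decomposition of the tail sum at the last positive
lemma drop_sum_split (ps : List Int) (f r : Nat) (hfr : f ≤ r + 1) :
    (ps.drop f).sum = ((ps.drop f).take (r + 1 - f)).sum + (ps.drop (r + 1)).sum := by
  have h1 : ps.drop f = (ps.drop f).take (r + 1 - f) ++ (ps.drop f).drop (r + 1 - f) :=
    (List.take_append_drop _ _).symm
  have h2 : (ps.drop f).drop (r + 1 - f) = ps.drop (r + 1) := by
    rw [List.drop_drop]
    congr 1
    omega
  calc (ps.drop f).sum = ((ps.drop f).take (r + 1 - f) ++ (ps.drop f).drop (r + 1 - f)).sum := by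
        rw [← h1]
    _ = ((ps.drop f).take (r + 1 - f)).sum + (ps.drop (r + 1)).sum := by
        rw [List.sum_append, h2]

-- evaluation rules for one step of B
lemma step_pos_unseen (t g x : Int) (hx : x > 0) :
    sublistMaxStep (t, g, false) x = (x, 0, true) := by simp [sublistMaxStep, hx]
lemma step_pos_seen (t g x : Int) (hx : x > 0) :
    sublistMaxStep (t, g, true) x = (t + g + x, 0, true) := by simp [sublistMaxStep, hx]
lemma step_nonpos_seen (t g x : Int) (hx : ¬ x > 0) :
    sublistMaxStep (t, g, true) x = (t, g + x, true) := by simp [sublistMaxStep, hx]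
lemma step_nonpos_unseen (t g x : Int) (hx : ¬ x > 0) :
    sublistMaxStep (t, g, false) x = (t, g, false) := by simp [sublistMaxStep, hx]

-- invariant of B's single pass
lemma foldB_spec (ps : List Int) :
    (lastPos ps = none → ps.foldl sublistMaxStep (0, 0, false) = (0, 0, false)) ∧
    (∀ f r, firstPos ps = some f → lastPos ps = some r →
      ps.foldl sublistMaxStep (0, 0, false)
        = (((ps.drop f).take (r + 1 - f)).sum, (ps.drop (r + 1)).sum, true)) := by
  induction ps using List.reverseRecOn with
  | nil => constructor
           · intro _; rfl
           · intro f r hf _; simp [firstPos] at hf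
  | append_singleton l x ih =>
      obtain ⟨ih0, ih1⟩ := ih
      rw [List.foldl_append]
      constructor
      · intro hnone
        rw [lastPos_append_singleton] at hnone
        by_cases hx : x > 0
        · simp [hx] at hnone
        · rw [if_neg hx] at hnone
          rw [ih0 hnone]
          simp only [List.foldl_cons, List.foldl_nil]
          rw [step_nonpos_unseen _ _ _ hx]
      · intro f r hf hr
        rw [firstPos_append_singleton] at hf
        rw [lastPos_append_singleton] at hr
        cases hl : lastPos l with
        | none =>
            -- l has no positive; firstPos l = none too
            have hfl : firstPos l = none :=
              (firstPos_eq_none_iff l).mpr ((lastPos_eq_none_iff l).mp hl)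
            rw [hfl] at hf
            rw [hl] at hr
            by_cases hx : x > 0
            · rw [if_pos hx] at hf hr
              obtain rfl : l.length = f := by simpa using hf
              obtain rfl : l.length = r := by simpa using hr
              rw [ih0 hl]
              simp only [List.foldl_cons, List.foldl_nil]
              rw [step_pos_unseen _ _ _ hx]
              have h1 : (l ++ [x]).drop l.length = [x] := by
                simp
              have h2 : (l ++ [x]).drop (l.length + 1) = [] := by
                rw [List.drop_eq_nil_iff]; simp
              have h3 : l.length + 1 - l.length = 1 := by omega
              rw [h1, h2, h3]
              simp
            · rw [if_neg hx] at hf hr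
              exact absurd hr (by simp)
        | some r' =>
            have hfl : firstPos l ≠ none := by
              intro h
              have := (lastPos_eq_none_iff l).mpr ((firstPos_eq_none_iff l).mp h)
              rw [this] at hl; exact absurd hl (by simp)
            obtain ⟨f', hf'⟩ := Option.ne_none_iff_exists'.mp hfl
            have hf'' : firstPos l = some f := by
              rw [hf']
              have : f' = f := by rw [hf'] at hf; simpa using hf
              rw [this]
            have hr'len : r' < l.length := lastPos_lt_length l r' hl
            have hflr : f ≤ r' := firstPos_le_lastPos l f r' hf'' hl
            have hIH := ih1 f r' hf'' hl
            rw [hl] at hr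
            by_cases hx : x > 0
            · rw [if_pos hx] at hr
              obtain rfl : l.length = r := by simpa using hr
              rw [hIH]
              simp only [List.foldl_cons, List.foldl_nil]
              rw [step_pos_seen _ _ _ hx]
              have hdrop : (l ++ [x]).drop f = l.drop f ++ [x] :=
                List.drop_append_of_le_length (by omega)
              have h1 : ((l ++ [x]).drop f).take (l.length + 1 - f) = l.drop f ++ [x] := by
                rw [hdrop, List.take_of_length_le]
                simp; omega
              have h2 : (l ++ [x]).drop (l.length + 1) = [] := by
                rw [List.drop_eq_nil_iff]; simp
              have hsplit := drop_sum_split l f r' (by omega)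
              have hsum : (l.drop f ++ [x]).sum
                  = ((l.drop f).take (r' + 1 - f)).sum + (l.drop (r' + 1)).sum + x := by
                rw [List.sum_append, hsplit]; simp
              rw [h1, h2, hsum]
              simp
            · rw [if_neg hx] at hr
              obtain rfl : r' = r := by simpa using hr
              rw [hIH]
              simp only [List.foldl_cons, List.foldl_nil]
              rw [step_nonpos_seen _ _ _ hx]
              have hdropf : (l ++ [x]).drop f = l.drop f ++ [x] :=
                List.drop_append_of_le_length (by omega)
              have h1 : ((l ++ [x]).drop f).take (r' + 1 - f) = (l.drop f).take (r' + 1 - f) := by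
                rw [hdropf, List.take_append_of_le_length]
                simp; omega
              have h2 : (l ++ [x]).drop (r' + 1) = l.drop (r' + 1) ++ [x] :=
                List.drop_append_of_le_length (by omega)
              rw [h1, h2]
              simp [List.sum_append]

-- A's forward scan finds the first positive (or 0)
lemma sublistMaxLeft_spec (ps : List Int) :
    ∀ i, i ≤ ps.length →
      sublistMaxLeft ps i = (match firstPos (ps.drop i) with
        | some j => i + j
        | none => 0) := by
  intro i hi
  induction hn : ps.length - i generalizing i with
  | zero =>
      have : i = ps.length := by omega
      subst this
      rw [sublistMaxLeft]
      simp [firstPos]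
  | succ n ih =>
      have hlt : i < ps.length := by omega
      rw [sublistMaxLeft]
      have hget : PySem.List.pyGetD ps (i : Int) 0 = ps[i] :=
        PySem.List.pyGetD_ofNat ps i 0 hlt
      have hdrop : ps.drop i = ps[i] :: ps.drop (i + 1) :=
        List.drop_eq_getElem_cons hlt
      rw [dif_pos hlt, hget, hdrop]
      by_cases hx : ps[i] > 0
      · simp [hx, firstPos]
      · rw [if_neg hx, ih (i + 1) (by omega) (by omega)]
        simp only [firstPos, if_neg hx]
        cases h : firstPos (ps.drop (i + 1)) with
        | none => simp
        | some v =>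
            simp only [Option.map_some]
            show (i + 1) + v = i + (v + 1)
            omega

-- A's backward scan finds the last positive (or 0)
lemma sublistMaxRight_spec (ps : List Int) :
    ∀ i, i < ps.length →
      sublistMaxRight ps i = (lastPos (ps.take (i + 1))).getD 0 := by
  intro i
  induction i with
  | zero =>
      intro h
      rcases ps with _ | ⟨x, xs⟩
      · simp at h
      · simp only [sublistMaxRight, List.take_succ_cons, List.take_zero, lastPos]
        by_cases hx : x > 0 <;> simp [hx]
  | succ i ih =>
      intro h
      have hi : i < ps.length := by omega
      have hget : PySem.List.pyGetD ps ((i + 1 : Nat) : Int) 0 = ps[i + 1] :=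
        PySem.List.pyGetD_ofNat ps (i + 1) 0 h
      have htake : ps.take (i + 2) = ps.take (i + 1) ++ [ps[i + 1]] :=
        List.take_succ_eq_append_getElem (by omega)
      rw [sublistMaxRight, hget, htake, lastPos_append_singleton]
      by_cases hx : ps[i + 1] > 0
      · simp [hx, List.length_take, Nat.min_eq_left (by omega : i + 1 ≤ ps.length)]
      · simp [hx, ih hi]

-- A's summation over range(l, r+1) is the sum of the corresponding slice
lemma range_sum_slice (ps : List Int) (l r : Nat) (hl : l ≤ r) (hr : r < ps.length) :
    (PySem.List.pyRange (l : Int) ((r : Int) + 1) 1).foldl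
      (fun acc j => acc + PySem.List.pyGetD ps j 0) 0
      = ((ps.drop l).take (r + 1 - l)).sum := by
  rw [PySem.List.foldl_add _ (fun j => PySem.List.pyGetD ps j 0) 0, zero_add]
  have h1 : (PySem.List.pyRange (l : Int) (ps.length : Int) 1).map
      (fun j => PySem.List.pyGetD ps j 0) = ps.drop l := by
    have := PySem.List.map_pyGetD_pyRange ps 0 (a := (l : Int)) (by positivity)
    simpa [PySem.List.len] using this
  have h2 : (PySem.List.pyRange ((r : Int) + 1) (ps.length : Int) 1).map
      (fun j => PySem.List.pyGetD ps j 0) = ps.drop (r + 1) := by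
    have := PySem.List.map_pyGetD_pyRange ps 0 (a := (r : Int) + 1) (by positivity)
    have hcast : (((r : Int) + 1)).toNat = r + 1 := by omega
    rw [hcast] at this
    simpa [PySem.List.len] using this
  have hsplit : PySem.List.pyRange (l : Int) (ps.length : Int) 1
      = PySem.List.pyRange (l : Int) ((r : Int) + 1) 1
        ++ PySem.List.pyRange ((r : Int) + 1) (ps.length : Int) 1 :=
    PySem.List.pyRange_one_append _ _ _ (by omega) (by omega)
  have h3 : ps.drop l
      = (PySem.List.pyRange (l : Int) ((r : Int) + 1) 1).map (fun j => PySem.List.pyGetD ps j 0)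
        ++ ps.drop (r + 1) := by
    rw [← h1, hsplit, List.map_append, h2]
  have hlen2 : ((PySem.List.pyRange (l : Int) ((r : Int) + 1) 1).map
      (fun j => PySem.List.pyGetD ps j 0)).length = r + 1 - l := by
    rw [List.length_map, PySem.List.length_pyRange_one]; omega
  rw [h3, ← hlen2, List.take_left]

-- characterisation of A's result on a nonempty list
lemma A_val (ps : List Int) (hps : ps ≠ []) :
    sublist_max ps =
      match firstPos ps, lastPos ps with
      | some f, some r => ((ps.drop f).take (r + 1 - f)).sum
      | _, _ => ps.head?.getD 0 := by
  have hlen : 0 < ps.length := List.length_pos_of_ne_nil hps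
  have hleft := sublistMaxLeft_spec ps 0 (by omega)
  rw [List.drop_zero] at hleft
  have hright := sublistMaxRight_spec ps (ps.length - 1) (by omega)
  have htake : ps.take (ps.length - 1 + 1) = ps := by
    rw [Nat.sub_add_cancel hlen]; exact List.take_length
  rw [htake] at hright
  show (PySem.List.pyRange ((sublistMaxLeft ps 0 : Nat) : Int)
      (((sublistMaxRight ps (ps.length - 1) : Nat) : Int) + 1) 1).foldl
      (fun acc j => acc + PySem.List.pyGetD ps j 0) 0 = _
  cases hf : firstPos ps with
  | none =>
      have hnone : lastPos ps = none :=
        (lastPos_eq_none_iff ps).mpr ((firstPos_eq_none_iff ps).mp hf)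
      rw [hf] at hleft
      rw [hnone] at hright
      simp only [hleft, hright, Option.getD_none, Nat.cast_zero]
      have hs := range_sum_slice ps 0 0 (le_refl 0) hlen
      simp only [Nat.cast_zero] at hs
      rw [hs]
      rcases ps with _ | ⟨a, t⟩
      · exact absurd rfl hps
      · simp
  | some f =>
      have hsome : lastPos ps ≠ none := by
        intro h
        have := (firstPos_eq_none_iff ps).mpr ((lastPos_eq_none_iff ps).mp h)
        rw [this] at hf; exact absurd hf (by simp)
      obtain ⟨r, hr⟩ := Option.ne_none_iff_exists'.mp hsome
      rw [hf] at hleft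
      rw [hr] at hright
      simp only [Option.getD_some] at hright
      have hfr : f ≤ r := firstPos_le_lastPos ps f r hf hr
      have hrlen : r < ps.length := lastPos_lt_length ps r hr
      rw [hr]
      simp only [hleft, hright, Nat.zero_add]
      exact range_sum_slice ps f r hfr hrlen

-- characterisation of B's result
lemma B_val (ps : List Int) :
    sublist_max_alt ps =
      match firstPos ps, lastPos ps with
      | some f, some r => ((ps.drop f).take (r + 1 - f)).sum
      | _, _ => 0 := by
  obtain ⟨h0, h1⟩ := foldB_spec ps
  unfold sublist_max_alt
  cases hr : lastPos ps with
  | none =>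
      have hf : firstPos ps = none :=
        (firstPos_eq_none_iff ps).mpr ((lastPos_eq_none_iff ps).mp hr)
      rw [h0 hr, hf]
  | some r =>
      have hsome : firstPos ps ≠ none := by
        intro h
        have := (lastPos_eq_none_iff ps).mpr ((firstPos_eq_none_iff ps).mp h)
        rw [this] at hr; exact absurd hr (by simp)
      obtain ⟨f, hf⟩ := Option.ne_none_iff_exists'.mp hsome
      rw [h1 f r hf hr, hf]

-- ===== VERDICT (by name: the statements are the Claim_ definitions above) =====
theorem sublist_max_spec : Claim_unchanged_sublist_max := by
  intro ps _hdom hpre hnd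
  rw [A_val ps hpre, B_val ps]
  cases hf : firstPos ps with
  | some f =>
      cases hr : lastPos ps with
      | some r => rfl
      | none =>
          exfalso
          have := (firstPos_eq_none_iff ps).mpr ((lastPos_eq_none_iff ps).mp hr)
          rw [this] at hf; exact absurd hf (by simp)
  | none =>
      have hr : lastPos ps = none :=
        (lastPos_eq_none_iff ps).mpr ((firstPos_eq_none_iff ps).mp hf)
      rw [hr]
      show ps.head?.getD 0 = 0
      -- no positive entry: ¬ D_ forces the head to be 0
      have hall : ∀ p ∈ ps, p ≤ 0 := (firstPos_eq_none_iff ps).mp hf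
      unfold D_sublist_max at hnd
      push Not at hnd
      exact hnd hall

theorem sublist_max_changed : Claim_changed_sublist_max := by
  unfold Claim_changed_sublist_max
  refine ⟨by decide, by decide, by decide, ?_, by decide, by decide⟩
  -- sublist_max [-1] = -1, via the characterisation (A's port recurses by well-founded recursion)
  rw [show sublist_max pvDiffWitness_sublist_max = sublist_max ([-1] : List Int) from rfl,
    A_val ([-1] : List Int) (by simp)]
  decide

theorem sublist_max_tight : Claim_exact_sublist_max := by
  intro ps _hdom hpre hd
  obtain ⟨hall, hhead⟩ := hd
  have hf : firstPos ps = none := (firstPos_eq_none_iff ps).mpr hall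
  have hr : lastPos ps = none := (lastPos_eq_none_iff ps).mpr hall
  rw [A_val ps hpre, B_val ps, hf, hr]
  simpa using hhead
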